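-- pv_equiv track=rewrite | github.com/ishangote/Coding-Interviews-Python | Busy Mall Problem/busy_mall.py | busy_mall
-- ===== SOURCE A (Python) =====
-- def busy_mall(data):
--     curr_people_count, max_people_count, max_timestamp = 0, 0, 0
--
--     for idx in range(len(data)):
--         if data[idx][2] == 0: curr_people_count -= data[idx][1]
--         else: curr_people_count += data[idx][1]
--
--         if idx != len(data) - 1 and data[idx + 1][0] != data[idx][0]:
--             if max_people_count < curr_people_count:
--                 max_people_count = curr_people_count
--                 max_timestamp = data[idx][0]
--
--     return max_timestamp
-- ===== SOURCE B (Python) =====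
-- def busy_mall(data):
--     # B: aggregate consecutive equal timestamps into (ts, net_delta) groups,
--     # then prefix-scan the groups (last group excluded, as in A) for the max.
--     groups = []
--     for ts, cnt, ev in data:
--         d = -cnt if ev == 0 else cnt
--         if groups and groups[-1][0] == ts:
--             groups[-1][1] += d
--         else:
--             groups.append([ts, d])
--     running, best, best_ts = 0, 0, 0
--     for ts, d in groups[:-1]:
--         running += d
--         if best < running:
--             best, best_ts = running, ts
--     return best_ts
-- ===== Notes on version B (the rewrite author's own statement) =====
-- stated objective: alternative
-- what changed: A fuses counting and max-detection into one index loop with a data[idx+1] lookahead; B first aggregates consecutive equal timestamps into (timestamp, net delta) groups, then prefix-scans all groups except the last to pick the earliest maximum.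
import Mathlib
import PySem

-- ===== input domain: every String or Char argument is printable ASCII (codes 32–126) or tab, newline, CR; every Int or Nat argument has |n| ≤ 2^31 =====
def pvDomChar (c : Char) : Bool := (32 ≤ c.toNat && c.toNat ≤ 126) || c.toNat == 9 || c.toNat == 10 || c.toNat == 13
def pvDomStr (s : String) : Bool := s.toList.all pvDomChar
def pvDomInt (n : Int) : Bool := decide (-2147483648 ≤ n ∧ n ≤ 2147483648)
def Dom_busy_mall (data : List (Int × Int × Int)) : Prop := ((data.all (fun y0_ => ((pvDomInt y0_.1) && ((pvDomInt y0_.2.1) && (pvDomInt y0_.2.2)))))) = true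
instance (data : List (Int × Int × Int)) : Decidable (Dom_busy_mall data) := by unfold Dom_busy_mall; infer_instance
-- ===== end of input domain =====

-- B replaces A's fused index loop with lookahead by a two-phase pass (aggregate
-- consecutive-timestamp groups, then prefix-scan all groups but the last); an
-- alternative decomposition of the same O(n) task, not claimed faster.

-- ===== PORT A =====
-- A's loop over idx, carrying (curr_people_count, max_people_count, max_timestamp);
-- 'idx != len(data)-1' ↔ the rest of the list is nonempty, 'data[idx+1][0]' ↔ head of rest.
def busyAux : (Int × Int × Int) → List (Int × Int × Int) → (Int × Int × Int)
  | s, [] => s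
  | (curr, maxc, maxts), t :: rest =>
    let curr' := if t.2.2 = 0 then curr - t.2.1 else curr + t.2.1
    match rest with
    | [] => (curr', maxc, maxts)
    | t' :: _ =>
      if t'.1 ≠ t.1 then
        if maxc < curr' then busyAux (curr', curr', t.1) rest
        else busyAux (curr', maxc, maxts) rest
      else busyAux (curr', maxc, maxts) rest

def busy_mall (data : List (Int × Int × Int)) : Int :=
  (busyAux (0, 0, 0) data).2.2

-- ===== PORT B =====
-- Source B phase 1: append to 'groups', mutating the last group; ported with the
-- accumulator kept in reverse (head = current last group), reversed at the end.
def bStep (acc : List (Int × Int)) (t : Int × Int × Int) : List (Int × Int) :=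
  let d := if t.2.2 = 0 then -t.2.1 else t.2.1
  match acc with
  | (ts, s) :: rest => if ts = t.1 then (ts, s + d) :: rest else (t.1, d) :: (ts, s) :: rest
  | [] => [(t.1, d)]

-- Source B phase 2 loop body over (running, best, best_ts)
def bScanStep (s : Int × Int × Int) (g : Int × Int) : Int × Int × Int :=
  let r := s.1 + g.2
  if s.2.1 < r then (r, r, g.1) else (r, s.2.1, s.2.2)

def busy_mall_alt (data : List (Int × Int × Int)) : Int :=
  let groups := (data.foldl bStep []).reverse
  (groups.dropLast.foldl bScanStep (0, 0, 0)).2.2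

-- ===== PRECONDITION & SPEC =====
def Spec_busy_mall (data : List (Int × Int × Int)) (out : Int) : Prop := out = busy_mall_alt data
instance (data : List (Int × Int × Int)) (out : Int) : Decidable (Spec_busy_mall data out) := by unfold Spec_busy_mall; infer_instance

-- ===== CLAIM (what is proved, stated in full; the proofs are below) =====
def Claim_equal_busy_mall : Prop := ∀ (data : List (Int × Int × Int)), Dom_busy_mall data → Spec_busy_mall data (busy_mall data)

-- ===== LEMMAS AND PROOFS =====

def pvDelta (t : Int × Int × Int) : Int := if t.2.2 = 0 then -t.2.1 else t.2.1

def pvMerge : Int × Int → List (Int × Int) → List (Int × Int)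
  | (a, d), (b, s) :: gs => if b = a then (a, d + s) :: gs else (a, d) :: (b, s) :: gs
  | (a, d), [] => [(a, d)]

def pvGrp : List (Int × Int × Int) → List (Int × Int)
  | [] => []
  | t :: l => pvMerge (t.1, pvDelta t) (pvGrp l)

theorem pvMerge_head (a d : Int) (gs : List (Int × Int)) :
    ∃ s gs', pvMerge (a, d) gs = (a, s) :: gs' := by
  cases gs with
  | nil => exact ⟨d, [], rfl⟩
  | cons g gs' =>
    obtain ⟨b, s⟩ := g
    by_cases h : b = a
    · exact ⟨d + s, gs', by simp [pvMerge, h]⟩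
    · exact ⟨d, (b, s) :: gs', by simp [pvMerge, h]⟩

theorem pvMerge_merge (a s d : Int) (gs : List (Int × Int)) :
    pvMerge (a, s) (pvMerge (a, d) gs) = pvMerge (a, s + d) gs := by
  cases gs with
  | nil => simp [pvMerge]
  | cons g gs' =>
    obtain ⟨b, x⟩ := g
    by_cases h : b = a
    · simp [pvMerge, h, add_assoc]
    · simp [pvMerge, h]

theorem foldl_bStep (l : List (Int × Int × Int)) :
    ∀ (ts s : Int) (rest : List (Int × Int)),
      List.foldl bStep ((ts, s) :: rest) l = (pvMerge (ts, s) (pvGrp l)).reverse ++ rest := by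
  induction l with
  | nil => intro ts s rest; simp [pvGrp, pvMerge]
  | cons t l' ih =>
    intro ts s rest
    by_cases h : ts = t.1
    · have hb : bStep ((ts, s) :: rest) t = (ts, s + pvDelta t) :: rest := by
        simp [bStep, pvDelta, h]
      rw [List.foldl_cons, hb, ih]
      have : pvMerge (ts, s + pvDelta t) (pvGrp l')
          = pvMerge (ts, s) (pvGrp (t :: l')) := by
        rw [pvGrp, ← h, pvMerge_merge]
      rw [this]
    · have hb : bStep ((ts, s) :: rest) t = (t.1, pvDelta t) :: (ts, s) :: rest := by
        simp [bStep, pvDelta, h]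
      rw [List.foldl_cons, hb, ih]
      obtain ⟨x, gs', hx⟩ := pvMerge_head t.1 (pvDelta t) (pvGrp l')
      have hm : pvMerge (ts, s) (pvGrp (t :: l')) = (ts, s) :: pvGrp (t :: l') := by
        rw [pvGrp, hx, pvMerge]
        simp [Ne.symm h]
      rw [hm]
      simp [pvGrp]
  
theorem foldl_bStep_nil (l : List (Int × Int × Int)) :
    List.foldl bStep [] l = (pvGrp l).reverse := by
  cases l with
  | nil => rfl
  | cons t l' =>
    have hb : bStep [] t = [(t.1, pvDelta t)] := by simp [bStep, pvDelta]
    rw [List.foldl_cons, hb, foldl_bStep]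
    simp [pvGrp]

theorem busyAux_grp (data : List (Int × Int × Int)) :
    ∀ (s : Int × Int × Int),
      (busyAux s data).2 = (List.foldl bScanStep s ((pvGrp data).dropLast)).2 := by
  induction data with
  | nil => intro s; rfl
  | cons t l ih =>
    intro s
    obtain ⟨c, m, mt⟩ := s
    have hcurr : (if t.2.2 = 0 then c - t.2.1 else c + t.2.1) = c + pvDelta t := by
      unfold pvDelta; split <;> ring
    cases l with
    | nil =>
      simp [busyAux, pvGrp, pvMerge]
    | cons t' l' =>
      obtain ⟨x, gs', hx⟩ := pvMerge_head t'.1 (pvDelta t') (pvGrp l')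
      have hgl : pvGrp (t' :: l') = (t'.1, x) :: gs' := by rw [pvGrp, hx]
      by_cases h : t'.1 = t.1
      · -- same timestamp: no max update in A; groups merge in B
        have hA : busyAux (c, m, mt) (t :: t' :: l')
            = busyAux (c + pvDelta t, m, mt) (t' :: l') := by
          rw [busyAux]; simp only [h, hcurr]; simp
        have hg : pvGrp (t :: t' :: l') = (t.1, pvDelta t + x) :: gs' := by
          rw [pvGrp, hgl, h, pvMerge]; simp
        rw [hA, ih]
        rw [hg, hgl]
        cases gs' with
        | nil => rfl
        | cons g gs'' =>
          have h1 : ((t.1, pvDelta t + x) :: g :: gs'').dropLast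
              = (t.1, pvDelta t + x) :: (g :: gs'').dropLast := rfl
          have h2 : ((t'.1, x) :: g :: gs'').dropLast
              = (t'.1, x) :: (g :: gs'').dropLast := rfl
          rw [h1, h2, List.foldl_cons, List.foldl_cons]
          have : bScanStep (c, m, mt) (t.1, pvDelta t + x)
              = bScanStep (c + pvDelta t, m, mt) (t'.1, x) := by
            simp [bScanStep, h, add_assoc]
          rw [this]
      · -- transition: A checks max; B's scan step does the same
        have hg : pvGrp (t :: t' :: l') = (t.1, pvDelta t) :: (t'.1, x) :: gs' := by
          rw [pvGrp, hgl, pvMerge]; simp [h]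
        have hdrop : ((t.1, pvDelta t) :: (t'.1, x) :: gs').dropLast
            = (t.1, pvDelta t) :: ((t'.1, x) :: gs').dropLast := rfl
        rw [hg, hdrop, List.foldl_cons, ← hgl]
        by_cases hm : m < c + pvDelta t
        · have hA : busyAux (c, m, mt) (t :: t' :: l')
              = busyAux (c + pvDelta t, c + pvDelta t, t.1) (t' :: l') := by
            rw [busyAux]; simp only [hcurr]; simp [h, hm]
          have hB : bScanStep (c, m, mt) (t.1, pvDelta t)
              = (c + pvDelta t, c + pvDelta t, t.1) := by
            simp [bScanStep, hm]
          rw [hA, hB, ih]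
        · have hA : busyAux (c, m, mt) (t :: t' :: l')
              = busyAux (c + pvDelta t, m, mt) (t' :: l') := by
            rw [busyAux]; simp only [hcurr]; simp [h, hm]
          have hB : bScanStep (c, m, mt) (t.1, pvDelta t)
              = (c + pvDelta t, m, mt) := by
            simp [bScanStep, hm]
          rw [hA, hB, ih]

-- ===== VERDICT (by name: the statement is the Claim_ definition above) =====
theorem busy_mall_spec : Claim_equal_busy_mall := by
  intro data _
  unfold Spec_busy_mall busy_mall busy_mall_alt
  rw [foldl_bStep_nil, List.reverse_reverse]
  simpa using congrArg Prod.snd (busyAux_grp data (0, 0, 0))
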